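-- pv_equiv track=rewrite | github.com/Franka-Beyer/HSprakt | MakeVectors.py | vary
-- ===== SOURCE A (Python) =====
-- from typing import List, Dict, Any, Tuple
--
-- def vary(remain:List[str], data:List[str]) -> None:
--     """
--     Generiert aus einer Liste sämtliche möglichen Patterns, indem die einzelnen Elemente der Reihe nach durch * ersetzt werden.
--     Die Strings 'X' und 'Y' bleiben dabei erhalten.
--
--     :param remain: Liste mit noch zu verarbeitenden Elementen
--     :param data: Anfang des Resultats
--     """
--     if not remain:
--         # keine noch zu verarbeitenden Elemente: fertig
--         yield data
--         return
--     x,*remain = remain  # erstes Element isolieren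
--     if x not in ("X", "Y"):
--         yield from vary(remain, data+("*",)) # Rest mit '*' statt des Elements generieren
--     yield from vary(remain, data+(x,)) # Rest mit diesem konkreten Element generieren
-- ===== SOURCE B (Python) =====
-- from itertools import product
--
-- def vary(remain, data):
--     # Same patterns via an explicit choice table and itertools.product
--     # instead of recursion; rightmost element varies fastest, '*' first.
--     choices = [(x,) if x in ("X", "Y") else ("*", x) for x in remain]
--     for combo in product(*choices):
--         yield data + combo
-- ===== Notes on version B (the rewrite author's own statement) =====
-- stated objective: idiomatic
-- what changed: Replaces A's recursive generator with a per-element choice table ((x,) for 'X'/'Y', ('*', x) otherwise) consumed by itertools.product, yielding data + combo in the same rightmost-fastest order.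
import Mathlib
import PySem

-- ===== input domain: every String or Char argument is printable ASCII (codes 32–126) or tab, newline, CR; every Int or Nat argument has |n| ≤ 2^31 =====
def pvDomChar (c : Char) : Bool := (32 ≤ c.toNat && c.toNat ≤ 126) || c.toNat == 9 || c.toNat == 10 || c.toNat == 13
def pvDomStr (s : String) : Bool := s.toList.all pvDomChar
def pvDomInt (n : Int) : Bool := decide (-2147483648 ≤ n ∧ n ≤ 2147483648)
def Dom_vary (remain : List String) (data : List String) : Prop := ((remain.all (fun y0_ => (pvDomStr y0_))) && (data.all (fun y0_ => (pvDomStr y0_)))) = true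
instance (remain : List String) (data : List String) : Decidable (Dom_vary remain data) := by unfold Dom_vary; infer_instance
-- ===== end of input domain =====

-- B replaces A's recursive generator by a choice table consumed with itertools.product
-- (idiomatic, same cost); the equivalence proved is about the yielded sequence of tuples.

-- ===== PORT A =====
-- A: recursive generator; first element either becomes '*' (unless 'X'/'Y') or stays,
-- then recurse on the rest; 'yield from' order = list append order.
def vary (remain : List String) (data : List String) : List (List String) :=
  match remain with
  | [] => [data]
  | x :: rest =>
      (if x ≠ "X" ∧ x ≠ "Y" then vary rest (data ++ ["*"]) else [])
        ++ vary rest (data ++ [x])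

-- ===== PORT B =====
-- itertools.product over a list of choice tuples, rightmost fastest (ported by hand).
def pyProduct (choices : List (List String)) : List (List String) :=
  match choices with
  | [] => [[]]
  | c :: cs => c.flatMap (fun v => (pyProduct cs).map (fun t => v :: t))

def vary_alt (remain : List String) (data : List String) : List (List String) :=
  let choices := remain.map (fun x => if x = "X" ∨ x = "Y" then [x] else ["*", x])
  (pyProduct choices).map (fun combo => data ++ combo)

-- ===== PRECONDITION & SPEC =====
def Spec_vary (remain : List String) (data : List String) (out : List (List String)) : Prop := out = vary_alt remain data
instance (remain : List String) (data : List String) (out : List (List String)) : Decidable (Spec_vary remain data out) := by unfold Spec_vary; infer_instance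

-- ===== CLAIM (what is proved, stated in full; the proofs are below) =====
def Claim_equal_vary : Prop := ∀ (remain : List String) (data : List String), Dom_vary remain data → Spec_vary remain data (vary remain data)

-- ===== LEMMAS AND PROOFS =====
theorem vary_eq_alt (remain data : List String) : vary remain data = vary_alt remain data := by
  induction remain generalizing data with
  | nil => simp [vary, vary_alt, pyProduct]
  | cons x rest ih =>
      by_cases hx : x = "X" ∨ x = "Y"
      · have hne : ¬ (x ≠ "X" ∧ x ≠ "Y") := by tauto
        simp only [vary, vary_alt, pyProduct, List.map_cons, if_pos hx, if_neg hne,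
          List.flatMap_cons, List.flatMap_nil, List.append_nil, List.map_map, List.nil_append,
          ih]
        simp [Function.comp_def]
      · have hne : x ≠ "X" ∧ x ≠ "Y" := by tauto
        simp only [vary, vary_alt, pyProduct, List.map_cons, if_neg hx, if_pos hne,
          List.flatMap_cons, List.flatMap_nil, List.append_nil, List.map_map,
          List.map_append, ih]
        simp [Function.comp_def]

-- ===== VERDICT (by name: the statement is the Claim_ definition above) =====
theorem vary_spec : Claim_equal_vary := by
  intro remain data _
  exact vary_eq_alt remain data
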